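-- pv_equiv track=rewrite | github.com/hmn1990/rubiks-cube-robot | src_21_step/verify_on_pc/cube.py | encode_4P4
-- ===== SOURCE A (Python) =====
-- def encode_4P4(p):
--     n=0;
--     for a in range(3):
--         n *= 4-a;
--         for b in range(a+1, 4):
--             if p[b] < p[a]:
--                 n += 1;
--     return n
-- ===== SOURCE B (Python) =====
-- def encode_4P4(p):
--     remaining = sorted(p[:4])
--     rank = 0
--     for i, w in ((0, 6), (1, 2), (2, 1)):
--         k = remaining.index(p[i])
--         rank += k * w
--         remaining.pop(k)
--     return rank
-- ===== Notes on version B (the rewrite author's own statement) =====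
-- stated objective: alternative
-- what changed: Replaced A's nested inversion-counting double loop with a single forward pass that ranks the permutation by successive removal: sort p[:4], then for each of the first three positions take the index of p[i] in the sorted 'remaining' list, weight it by 6/2/1 and pop it.
import Mathlib
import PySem

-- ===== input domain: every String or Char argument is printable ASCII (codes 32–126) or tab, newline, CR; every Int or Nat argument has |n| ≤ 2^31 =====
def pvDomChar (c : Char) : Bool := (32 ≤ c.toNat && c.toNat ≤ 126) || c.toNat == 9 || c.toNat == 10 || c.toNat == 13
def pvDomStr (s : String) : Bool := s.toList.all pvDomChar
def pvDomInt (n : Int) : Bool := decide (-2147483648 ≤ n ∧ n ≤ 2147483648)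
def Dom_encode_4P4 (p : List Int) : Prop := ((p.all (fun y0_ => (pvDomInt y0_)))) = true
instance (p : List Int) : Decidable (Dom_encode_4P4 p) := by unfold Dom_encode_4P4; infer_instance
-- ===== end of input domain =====

-- B replaces A's nested inversion-counting double loop by a single pass that ranks the
-- permutation by successive removal from a sorted 'remaining' list (objective: alternative).

-- ===== PORT A =====
def encode_4P4 (p : List Int) : Int :=
  (PySem.List.pyRange 0 3 1).foldl (fun n a =>
    let n := n * (4 - a)
    (PySem.List.pyRange (a + 1) 4 1).foldl (fun n b =>
      if PySem.List.pyGetD p b 0 < PySem.List.pyGetD p a 0 then n + 1 else n) n) 0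

-- ===== PORT B =====
-- one iteration of Source B's loop body; the `none` fallbacks are unreachable under Pre_
-- (in Python they would be a ValueError / IndexError)
def encode_4P4_altStep (p : List Int) (st : Int × List Int) (iw : Int × Int) : Int × List Int :=
  match PySem.List.index? st.2 (PySem.List.pyGetD p iw.1 0) with
  | some k =>
    match PySem.List.pop? st.2 (k : Int) with
    | some r => (st.1 + (k : Int) * iw.2, r.2)
    | none => st
  | none => st

def encode_4P4_alt (p : List Int) : Int :=
  let remaining := PySem.List.sorted (PySem.List.slice p none (some 4)) (fun x => x) false
  (([((0 : Int), (6 : Int)), (1, 2), (2, 1)]).foldl (encode_4P4_altStep p) (0, remaining)).1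

-- ===== PRECONDITION & SPEC =====
-- A indexes the first four positions, so it raises IndexError when the list has fewer than 4 elements.
def Pre_encode_4P4 (p : List Int) : Prop := 4 ≤ p.length
instance (p : List Int) : Decidable (Pre_encode_4P4 p) := by unfold Pre_encode_4P4; infer_instance
def pvWitness_encode_4P4 : List Int := [2, 0, 3, 1]

def Spec_encode_4P4 (p : List Int) (out : Int) : Prop := out = encode_4P4_alt p
instance (p : List Int) (out : Int) : Decidable (Spec_encode_4P4 p out) := by unfold Spec_encode_4P4; infer_instance

-- ===== CLAIM (what is proved, stated in full; the proofs are below) =====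
def Claim_equal_encode_4P4 : Prop := ∀ (p : List Int), Dom_encode_4P4 p → Pre_encode_4P4 p → Spec_encode_4P4 p (encode_4P4 p)

-- ===== LEMMAS AND PROOFS =====

-- In a weakly sorted list, the first occurrence of a member x sits right after the
-- elements strictly below x, so list.index(x) = countP (· < x).
theorem pv_idx_sorted (s : List Int) (hs : s.Pairwise (· ≤ ·)) (x : Int) (hx : x ∈ s) :
    PySem.List.index? s x = some (s.countP (fun y => decide (y < x))) := by
  induction s with
  | nil => cases hx
  | cons h tl ih =>
    rw [List.pairwise_cons] at hs
    obtain ⟨hhd, htl⟩ := hs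
    by_cases hhx : h = x
    · subst hhx
      rw [PySem.List.index?_cons_self]
      have hz : tl.countP (fun y => decide (y < h)) = 0 := by
        rw [List.countP_eq_zero]
        intro y hy
        simp only [decide_eq_true_eq]
        exact not_lt.mpr (hhd y hy)
      simp [hz]
    · have hxtl : x ∈ tl := by
        rcases List.mem_cons.mp hx with h1 | h1
        · exact absurd h1.symm hhx
        · exact h1
      rw [PySem.List.index?_cons_of_ne tl hhx, ih htl hxtl]
      have hlt : h < x := lt_of_le_of_ne (hhd x hxtl) hhx
      simp [hlt]

-- One loop iteration of B: with a sorted remaining list s and p[i] = x ∈ s, the step adds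
-- countP (· < x) s times the weight and removes one occurrence of x, keeping s sorted.
theorem pv_step_spec (p : List Int) (r : Int) (s : List Int) (i w : Int)
    (hs : s.Pairwise (· ≤ ·)) (x : Int) (hget : PySem.List.pyGetD p i 0 = x) (hmem : x ∈ s) :
    ∃ s', encode_4P4_altStep p (r, s) (i, w)
        = (r + ((s.countP (fun y => decide (y < x)) : Nat) : Int) * w, s')
      ∧ s'.Pairwise (· ≤ ·)
      ∧ ∀ q : Int → Bool, s'.countP q + (if q x then 1 else 0) = s.countP q := by
  have hidx := pv_idx_sorted s hs x hmem
  set k := s.countP (fun y => decide (y < x)) with hk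
  obtain ⟨pre, suf, hdec, hlen, -⟩ := (PySem.List.index?_eq_some_iff s x k).mp hidx
  have hklt : k < s.length := by
    rw [hdec, List.length_append, List.length_cons, ← hlen]
    omega
  have hpop : PySem.List.pop? s (k : Int) = some (s[k], s.eraseIdx k) :=
    PySem.List.pop?_natCast s k hklt
  have herase : s.eraseIdx k = pre ++ suf := by
    rw [hdec, ← hlen]
    simp [List.eraseIdx_append_of_length_le (le_refl pre.length)]
  refine ⟨pre ++ suf, ?_, ?_, ?_⟩
  · simp only [encode_4P4_altStep, hget, hidx, hpop, herase]
  · have hsub : (pre ++ suf).Sublist s := by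
      rw [hdec]
      exact List.Sublist.append (List.Sublist.refl pre) (List.sublist_cons_self x suf)
    exact hs.sublist hsub
  · intro q
    rw [hdec]
    simp [List.countP_append, List.countP_cons]
    cases hq : q x <;> simp <;> try omega

-- ===== VERDICT (by name: the statement is the Claim_ definition above) =====
set_option maxHeartbeats 1000000 in
theorem encode_4P4_spec : Claim_equal_encode_4P4 := by
  intro p _ hpre
  unfold Pre_encode_4P4 at hpre
  match p, hpre with
  | a :: b :: c :: d :: t, _ =>
    show encode_4P4 _ = encode_4P4_alt _
    set p := a :: b :: c :: d :: t with hp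
    have hslice : PySem.List.slice p none (some 4) = [a, b, c, d] := by
      rw [hp]; simp [pysem]
    set s0 := PySem.List.sorted (PySem.List.slice p none (some 4)) (fun x => x) false with hs0
    have hpair0 : s0.Pairwise (· ≤ ·) := PySem.List.sorted_pairwise _ _
    have hperm : s0.Perm [a, b, c, d] := hslice ▸ PySem.List.sorted_perm _ _ _
    have hcount : ∀ q : Int → Bool, s0.countP q = [a, b, c, d].countP q :=
      fun q => hperm.countP_eq q
    have hga : PySem.List.pyGetD p 0 0 = a := by rw [hp]; simp [pysem]
    have hgb : PySem.List.pyGetD p 1 0 = b := by rw [hp]; simp [pysem]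
    have hgc : PySem.List.pyGetD p 2 0 = c := by rw [hp]; simp [pysem]
    have hma : a ∈ s0 := hperm.mem_iff.mpr (by simp)
    obtain ⟨s1, heq1, hpair1, hinv1⟩ := pv_step_spec p 0 s0 0 6 hpair0 a hga hma
    have hmb : b ∈ s1 := by
      have h1 := hinv1 (fun y => decide (y = b))
      have h2 := hcount (fun y => decide (y = b))
      have hpos : 0 < s1.countP (fun y => decide (y = b)) := by
        simp [List.countP_cons] at h1 h2
        split_ifs at h1 h2 <;> omega
      obtain ⟨y, hy, hyb⟩ := List.countP_pos_iff.mp hpos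
      exact (by simpa using hyb : y = b) ▸ hy
    obtain ⟨s2, heq2, hpair2, hinv2⟩ :=
      pv_step_spec p (0 + (s0.countP (fun y => decide (y < a)) : Int) * 6) s1 1 2 hpair1 b hgb hmb
    have hmc : c ∈ s2 := by
      have h0 := hinv1 (fun y => decide (y = c))
      have h1 := hinv2 (fun y => decide (y = c))
      have h2 := hcount (fun y => decide (y = c))
      have hpos : 0 < s2.countP (fun y => decide (y = c)) := by
        simp [List.countP_cons] at h0 h1 h2
        split_ifs at h0 h1 h2 <;> omega
      obtain ⟨y, hy, hyc⟩ := List.countP_pos_iff.mp hpos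
      exact (by simpa using hyc : y = c) ▸ hy
    obtain ⟨s3, heq3, hpair3, hinv3⟩ :=
      pv_step_spec p (0 + (s0.countP (fun y => decide (y < a)) : Int) * 6
        + (s1.countP (fun y => decide (y < b)) : Int) * 2) s2 2 1 hpair2 c hgc hmc
    have hB : encode_4P4_alt p
        = 0 + (s0.countP (fun y => decide (y < a)) : Int) * 6
            + (s1.countP (fun y => decide (y < b)) : Int) * 2
            + (s2.countP (fun y => decide (y < c)) : Int) * 1 := by
      simp only [encode_4P4_alt, ← hs0, List.foldl_cons, List.foldl_nil, heq1, heq2, heq3]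
    have e0 := hcount (fun y => decide (y < a))
    have e1a := hinv1 (fun y => decide (y < b))
    have e1b := hcount (fun y => decide (y < b))
    have e2a := hinv2 (fun y => decide (y < c))
    have e2b := hinv1 (fun y => decide (y < c))
    have e2c := hcount (fun y => decide (y < c))
    rw [hB, hp]
    generalize hn0 : s0.countP (fun y => decide (y < a)) = n0 at e0 ⊢
    generalize hn1 : s1.countP (fun y => decide (y < b)) = n1 at e1a ⊢
    generalize hn2 : s2.countP (fun y => decide (y < c)) = n2 at e2a ⊢
    clear hB hinv1 hinv2 hinv3 hpair1 hpair2 hpair3 hpair0 hma hmb hmc hcount hperm hslice hga hgb hgc hn0 hn1 hn2 heq3 heq2 heq1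
    simp only [encode_4P4]
    rw [show PySem.List.pyRange 0 3 1 = [0, 1, 2] from rfl]
    simp only [List.foldl_cons, List.foldl_nil]
    rw [show PySem.List.pyRange (0 + 1) 4 1 = [1, 2, 3] from rfl,
        show PySem.List.pyRange (1 + 1) 4 1 = [2, 3] from rfl,
        show PySem.List.pyRange (2 + 1) 4 1 = [3] from rfl]
    simp only [List.foldl_cons, List.foldl_nil]
    simp [pysem]
    simp [List.countP_cons] at e0 e1a e1b e2a e2b e2c
    split_ifs at e0 e1a e1b e2a e2b e2c ⊢ <;> omega
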